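-- pv_equiv track=rewrite | github.com/manrajpannu/ccc-solutions | ccc-solutions/2017/s2_2017a.py | low_high_finder
-- ===== SOURCE A (Python) =====
-- def low_high_finder(tides):
-- 	high_tide = []
-- 	low_tide  = []
-- 	while tides:
-- 		if tides:
-- 			low_tide.append(min(tides))
-- 			tides.remove(min(tides))
--
-- 		if tides:
-- 			high_tide.append(max(tides))
-- 			tides.remove(max(tides))
--
-- 		if len(tides) == 1:
-- 			low_tide.append(tides.pop())
--
-- 	return (high_tide),(low_tide)
-- ===== SOURCE B (Python) =====
-- def low_high_finder(tides):
--     # NOTE: A empties the input list in place; this version does not mutate it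
--     # (equivalence is about the return value).
--     s = sorted(tides)
--     k = (len(s) + 1) // 2
--     high = s[k:]
--     high.reverse()
--     return high, s[:k]
-- ===== Notes on version B (the rewrite author's own statement) =====
-- stated objective: faster
-- what changed: A repeatedly scans the remaining list for min and max and removes them one pair at a time (quadratic); B sorts once and slices: low tide is the first ceil(n/2) of the sorted list, high tide is the rest reversed.
import Mathlib
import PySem

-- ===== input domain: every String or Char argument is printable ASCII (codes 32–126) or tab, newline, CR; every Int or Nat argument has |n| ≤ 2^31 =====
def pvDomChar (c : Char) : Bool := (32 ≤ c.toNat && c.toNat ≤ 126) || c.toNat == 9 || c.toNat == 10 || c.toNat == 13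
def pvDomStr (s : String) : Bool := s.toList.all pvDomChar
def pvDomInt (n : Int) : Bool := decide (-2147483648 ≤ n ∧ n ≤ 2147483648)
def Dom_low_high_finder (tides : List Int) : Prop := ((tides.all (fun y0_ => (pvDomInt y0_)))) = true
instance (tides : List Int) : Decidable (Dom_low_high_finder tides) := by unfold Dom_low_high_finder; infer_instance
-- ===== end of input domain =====

-- B replaces A's quadratic repeated min/max extraction by one sort plus two slices; the check
-- measured B faster at the large sizes. A empties its argument in place; B does not mutate it,
-- the equivalence proved here is about the return value.

-- ===== PORT A =====
-- A's while-loop: each iteration removes min(tides) into low_tide, then (if any left)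
-- max(tides) into high_tide, then pops a lone survivor into low_tide.
-- min(tides)/max(tides) are the running fold (PySem.List.min?_id_cons / max?_id_cons);
-- tides.remove(v) with v ∈ tides is List.erase (PySem.List.remove?_eq_some_erase).
def lhfLoopA (tides high low : List Int) : List Int × List Int :=
  match tides with
  | [] => (high, low)
  | x :: xs =>
    let m := xs.foldl min x                    -- min(tides)
    let low1 := low ++ [m]
    let t1 := (x :: xs).erase m                -- tides.remove(min(tides))
    if t1 = [] then
      lhfLoopA [] high low1
    else
      let M := t1.foldl max t1.headI           -- max(tides) (running max over the nonempty t1)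
      let high1 := high ++ [M]
      let t2 := t1.erase M                     -- tides.remove(max(tides))
      if t2.length = 1 then
        lhfLoopA [] high1 (low1 ++ t2)         -- low_tide.append(tides.pop()); tides now empty
      else
        lhfLoopA t2 high1 low1
termination_by tides.length
decreasing_by
  · simp
  · simp
  · simp only [List.foldl_attach]
    have hm : xs.foldl min x = x ∨ xs.foldl min x ∈ xs := PySem.List.foldl_min_mem xs x
    have hmem : xs.foldl min x ∈ x :: xs := by rcases hm with h | h <;> simp [h]
    have h1 : ((x :: xs).erase (xs.foldl min x)).length = xs.length :=
      by rw [List.length_erase_of_mem hmem]; simp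
    have h2 : (((x :: xs).erase (xs.foldl min x)).erase
        (((x :: xs).erase (xs.foldl min x)).foldl max ((x :: xs).erase (xs.foldl min x)).headI)).length
        ≤ ((x :: xs).erase (xs.foldl min x)).length := List.length_erase_le
    simp only [List.length_cons]
    omega

def low_high_finder (tides : List Int) : List Int × List Int :=
  lhfLoopA tides [] []

-- ===== PORT B =====
-- Source B: s = sorted(tides); k = (len(s)+1)//2; high = s[k:]; high.reverse(); return high, s[:k]
def low_high_finder_alt (tides : List Int) : List Int × List Int :=
  let s := PySem.List.sorted tides (fun x => x) false
  let k := PySem.Int.floordiv ((s.length : Int) + 1) 2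
  let high := (PySem.List.slice s (some k) none).reverse
  (high, PySem.List.slice s none (some k))

-- ===== PRECONDITION & SPEC =====
def Spec_low_high_finder (tides : List Int) (out : List Int × List Int) : Prop := out = low_high_finder_alt tides
instance (tides : List Int) (out : List Int × List Int) : Decidable (Spec_low_high_finder tides out) := by unfold Spec_low_high_finder; infer_instance

-- ===== CLAIM (what is proved, stated in full; the proofs are below) =====
def Claim_equal_low_high_finder : Prop := ∀ (tides : List Int), Dom_low_high_finder tides → Spec_low_high_finder tides (low_high_finder tides)

-- ===== LEMMAS AND PROOFS =====

-- min of nonempty list characterization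
lemma min_char (x : Int) (xs : List Int) :
    xs.foldl min x ∈ x :: xs ∧ ∀ z ∈ x :: xs, xs.foldl min x ≤ z := by
  have h1 := PySem.List.foldl_min_le xs x
  have h2 := PySem.List.foldl_min_mem xs x
  constructor
  · rcases h2 with h | h <;> simp [h]
  · intro z hz
    rcases List.mem_cons.mp hz with rfl | hz
    · exact h1.1
    · exact h1.2 z hz

lemma max_char (y : Int) (ys : List Int) :
    ys.foldl max y ∈ y :: ys ∧ ∀ z ∈ y :: ys, z ≤ ys.foldl max y := by
  have h1 := PySem.List.le_foldl_max ys y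
  have h2 := PySem.List.foldl_max_mem ys y
  constructor
  · rcases h2 with h | h <;> simp [h]
  · intro z hz
    rcases List.mem_cons.mp hz with rfl | hz
    · exact h1.1
    · exact h1.2 z hz

lemma min_eq_of_perm (x y : Int) (xs ys : List Int) (hp : (x :: xs).Perm (y :: ys)) :
    xs.foldl min x = ys.foldl min y := by
  have hx := min_char x xs
  have hy := min_char y ys
  exact le_antisymm (hx.2 _ (hp.mem_iff.mpr hy.1)) (hy.2 _ (hp.mem_iff.mp hx.1))

lemma max_eq_of_perm (y y' : Int) (ys ys' : List Int) (hp : (y :: ys).Perm (y' :: ys')) :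
    ys.foldl max y = ys'.foldl max y' := by
  have hx := max_char y ys
  have hy := max_char y' ys'
  exact le_antisymm (hy.2 _ (hp.mem_iff.mp hx.1)) (hx.2 _ (hp.mem_iff.mpr hy.1))

lemma loopA_nil (h l : List Int) : lhfLoopA [] h l = (h, l) := by
  simp [lhfLoopA]

lemma foldl_max_headI_eq_of_perm (t t' : List Int) (ht : t ≠ []) (ht' : t' ≠ []) (hp : t.Perm t') :
    t.foldl max t.headI = t'.foldl max t'.headI := by
  match t, t' with
  | y :: ys, y' :: ys' =>
    have e1 : (y :: ys).foldl max (y :: ys).headI = ys.foldl max y := by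
      simp [List.headI, List.foldl]
    have e2 : (y' :: ys').foldl max (y' :: ys').headI = ys'.foldl max y' := by
      simp [List.headI, List.foldl]
    rw [e1, e2]
    exact max_eq_of_perm _ _ _ _ hp

lemma loopA_cons (x : Int) (xs h l : List Int) :
    lhfLoopA (x :: xs) h l =
      (if (x :: xs).erase (xs.foldl min x) = [] then (h, l ++ [xs.foldl min x])
       else
         if (((x :: xs).erase (xs.foldl min x)).erase
               (((x :: xs).erase (xs.foldl min x)).foldl max
                 ((x :: xs).erase (xs.foldl min x)).headI)).length = 1 then
           (h ++ [((x :: xs).erase (xs.foldl min x)).foldl max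
                    ((x :: xs).erase (xs.foldl min x)).headI],
            l ++ [xs.foldl min x] ++
              ((x :: xs).erase (xs.foldl min x)).erase
                (((x :: xs).erase (xs.foldl min x)).foldl max
                  ((x :: xs).erase (xs.foldl min x)).headI))
         else
           lhfLoopA (((x :: xs).erase (xs.foldl min x)).erase
               (((x :: xs).erase (xs.foldl min x)).foldl max
                 ((x :: xs).erase (xs.foldl min x)).headI))
             (h ++ [((x :: xs).erase (xs.foldl min x)).foldl max
                      ((x :: xs).erase (xs.foldl min x)).headI])
             (l ++ [xs.foldl min x])) := by
  rw [lhfLoopA]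
  simp only [loopA_nil]

lemma loopA_perm : ∀ (n : Nat) (t t' h l : List Int), t.length ≤ n → t.Perm t' →
    lhfLoopA t h l = lhfLoopA t' h l := by
  intro n
  induction n with
  | zero =>
    intro t t' h l hn hp
    have ht : t = [] := List.length_eq_zero_iff.mp (Nat.le_zero.mp hn)
    subst ht
    rw [hp.symm.eq_nil]
  | succ n ih =>
    intro t t' h l hn hp
    match t, t' with
    | [], t' => rw [hp.symm.eq_nil]
    | x :: xs, [] => exact absurd hp.eq_nil (by simp)
    | x :: xs, x' :: xs' =>
      rw [loopA_cons, loopA_cons]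
      have hm : xs.foldl min x = xs'.foldl min x' := min_eq_of_perm _ _ _ _ hp
      have hp1 : ((x :: xs).erase (xs.foldl min x)).Perm ((x' :: xs').erase (xs.foldl min x)) :=
        hp.erase _
      rw [hm] at hp1
      simp only [hm]
      by_cases h1 : (x :: xs).erase (xs'.foldl min x') = []
      · rw [if_pos h1, if_pos (by rw [h1] at hp1; exact hp1.symm.eq_nil)]
      · have h1' : (x' :: xs').erase (xs'.foldl min x') ≠ [] := by
          intro hc; rw [hc] at hp1; exact h1 hp1.eq_nil
        rw [if_neg h1, if_neg h1']
        have hM : ((x :: xs).erase (xs'.foldl min x')).foldl max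
              ((x :: xs).erase (xs'.foldl min x')).headI
            = ((x' :: xs').erase (xs'.foldl min x')).foldl max
              ((x' :: xs').erase (xs'.foldl min x')).headI :=
          foldl_max_headI_eq_of_perm _ _ h1 h1' hp1
        rw [hM]
        have hp2 : (((x :: xs).erase (xs'.foldl min x')).erase
              (((x' :: xs').erase (xs'.foldl min x')).foldl max
                ((x' :: xs').erase (xs'.foldl min x')).headI)).Perm
            (((x' :: xs').erase (xs'.foldl min x')).erase
              (((x' :: xs').erase (xs'.foldl min x')).foldl max
                ((x' :: xs').erase (xs'.foldl min x')).headI)) := hp1.erase _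
        have hlen : (((x :: xs).erase (xs'.foldl min x')).erase
              (((x' :: xs').erase (xs'.foldl min x')).foldl max
                ((x' :: xs').erase (xs'.foldl min x')).headI)).length
            = (((x' :: xs').erase (xs'.foldl min x')).erase
              (((x' :: xs').erase (xs'.foldl min x')).foldl max
                ((x' :: xs').erase (xs'.foldl min x')).headI)).length := hp2.length_eq
        rw [hlen]
        by_cases h2 : (((x' :: xs').erase (xs'.foldl min x')).erase
              (((x' :: xs').erase (xs'.foldl min x')).foldl max
                ((x' :: xs').erase (xs'.foldl min x')).headI)).length = 1
        · rw [if_pos h2, if_pos h2]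
          obtain ⟨a, ha⟩ := List.length_eq_one_iff.mp h2
          rw [ha] at hp2 ⊢
          rw [List.perm_singleton.mp hp2]
        · rw [if_neg h2, if_neg h2]
          apply ih _ _ _ _ _ hp2
          have hmem : xs'.foldl min x' ∈ x :: xs := by
            rw [← hm]; exact (min_char x xs).1
          have he1 : ((x :: xs).erase (xs'.foldl min x')).length = xs.length := by
            rw [List.length_erase_of_mem hmem]; simp
          have he2 := List.length_erase_le (l := (x :: xs).erase (xs'.foldl min x'))
            (a := ((x' :: xs').erase (xs'.foldl min x')).foldl max
                ((x' :: xs').erase (xs'.foldl min x')).headI)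
          simp only [List.length_cons] at hn
          omega
lemma sorted_min_head (x : Int) (xs : List Int) (hs : (x :: xs).Pairwise (· ≤ ·)) :
    xs.foldl min x = x := by
  have h1 := PySem.List.foldl_min_le xs x
  rcases PySem.List.foldl_min_mem xs x with h | h
  · exact h
  · exact le_antisymm h1.1 ((List.pairwise_cons.mp hs).1 _ h)

lemma sorted_getLast_max (xs : List Int) (hxs : xs ≠ []) (hs : xs.Pairwise (· ≤ ·)) :
    ∀ z ∈ xs, z ≤ xs.getLast hxs := by
  intro z hz
  have hsplit := List.dropLast_append_getLast hxs
  rw [← hsplit] at hs hz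
  rcases List.mem_append.mp hz with h | h
  · exact (List.pairwise_append.mp hs).2.2 _ h _ (by simp)
  · simp at h; simp [h]

lemma max_headI_char (xs : List Int) (hxs : xs ≠ []) :
    xs.foldl max xs.headI ∈ xs ∧ ∀ z ∈ xs, z ≤ xs.foldl max xs.headI := by
  match xs with
  | y :: ys =>
    have e1 : (y :: ys).foldl max (y :: ys).headI = ys.foldl max y := by
      simp [List.headI, List.foldl]
    rw [e1]
    exact max_char y ys

lemma loop_sorted : ∀ (n : Nat) (s h l : List Int), s.length ≤ n → s.Pairwise (· ≤ ·) →
    lhfLoopA s h l = (h ++ (s.drop ((s.length + 1) / 2)).reverse,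
                      l ++ s.take ((s.length + 1) / 2)) := by
  intro n
  induction n with
  | zero =>
    intro s h l hn hs
    have hnil : s = [] := List.length_eq_zero_iff.mp (Nat.le_zero.mp hn)
    subst hnil
    simp [loopA_nil]
  | succ n ih =>
    intro s h l hn hs
    match s with
    | [] => simp [loopA_nil]
    | x :: xs =>
      rw [loopA_cons]
      rw [sorted_min_head x xs hs, List.erase_cons_head]
      by_cases hxs : xs = []
      · subst hxs
        simp
      · rw [if_neg hxs]
        set M := xs.foldl max xs.headI with hMdef
        have hM := max_headI_char xs hxs
        rw [← hMdef] at hM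
        have hlast : xs.getLast hxs = M :=
          le_antisymm (hM.2 _ (List.getLast_mem hxs)) (sorted_getLast_max xs hxs hs.of_cons _ hM.1)
        have hsplit : xs.dropLast ++ [M] = xs := by
          rw [← hlast]; exact List.dropLast_append_getLast hxs
        have hstep : xs.erase M = (xs.dropLast ++ [M]).erase M := by rw [hsplit]
        have hperm2 : (xs.erase M).Perm xs.dropLast := by
          rw [hstep]
          have hp := (List.perm_append_singleton M xs.dropLast).erase M
          rw [List.erase_cons_head] at hp
          exact hp
        have hmids : xs.dropLast.Pairwise (· ≤ ·) :=
          List.Pairwise.sublist (List.dropLast_sublist xs) hs.of_cons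
        have hL : xs.length ≥ 1 := by
          cases xs with
          | nil => exact absurd rfl hxs
          | cons a b => simp
        have hmidlen : xs.dropLast.length = xs.length - 1 := by simp
        by_cases h2 : (xs.erase M).length = 1
        · rw [if_pos h2]
          have hml : xs.dropLast.length = 1 := by rw [← hperm2.length_eq]; exact h2
          obtain ⟨a, ha⟩ := List.length_eq_one_iff.mp hml
          have ht2 : xs.erase M = [a] := by
            rw [ha] at hperm2; exact List.perm_singleton.mp hperm2
          have hxs2 : xs = [a, M] := by rw [← hsplit, ha]; rfl
          rw [ht2, hxs2]
          simp
        · rw [if_neg h2]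
          have hlen2 : (xs.erase M).length = xs.length - 1 := by
            rw [hperm2.length_eq, hmidlen]
          simp only [List.length_cons] at hn
          rw [loopA_perm n _ xs.dropLast _ _ (by omega) hperm2]
          rw [ih xs.dropLast _ _ (by omega) hmids]
          have hk : ((x :: xs).length + 1) / 2 = (xs.dropLast.length + 1) / 2 + 1 := by
            simp only [List.length_cons, hmidlen]; omega
          have hk' : (xs.dropLast.length + 1) / 2 ≤ xs.dropLast.length := by omega
          rw [hk]
          obtain ⟨k2, hk2⟩ : ∃ k2, (xs.dropLast.length + 1) / 2 = k2 := ⟨_, rfl⟩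
          rw [hk2] at hk' ⊢
          rw [Prod.mk.injEq]
          refine ⟨?_, ?_⟩
          · rw [List.drop_succ_cons]
            conv_rhs => rw [← hsplit]
            rw [List.drop_append_of_le_length hk', List.reverse_append]
            simp
          · rw [List.take_succ_cons]
            conv_rhs => rw [← hsplit]
            rw [List.take_append_of_le_length hk']
            simp

-- ===== VERDICT (by name: the statement is the Claim_ definition above) =====
theorem low_high_finder_spec : Claim_equal_low_high_finder := by
  intro tides _hdom
  unfold Spec_low_high_finder low_high_finder low_high_finder_alt
  have hperm : tides.Perm (PySem.List.sorted tides (fun x => x) false) :=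
    (PySem.List.sorted_perm tides (fun x => x) false).symm
  rw [loopA_perm tides.length _ _ _ _ le_rfl hperm]
  have hsp : (PySem.List.sorted tides (fun x => x) false).Pairwise (· ≤ ·) :=
    PySem.List.sorted_pairwise tides (fun x => x)
  rw [loop_sorted (PySem.List.sorted tides (fun x => x) false).length _ _ _ le_rfl hsp]
  have hcast : ((PySem.List.sorted tides (fun x => x) false).length : Int) + 1
      = (((PySem.List.sorted tides (fun x => x) false).length + 1 : Nat) : Int) := by push_cast; ring
  have hfd : PySem.Int.floordiv (((PySem.List.sorted tides (fun x => x) false).length : Int) + 1) 2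
      = ((((PySem.List.sorted tides (fun x => x) false).length + 1) / 2 : Nat) : Int) := by
    rw [hcast]
    exact_mod_cast PySem.Int.floordiv_natCast ((PySem.List.sorted tides (fun x => x) false).length + 1) 2
  dsimp only
  rw [hfd, PySem.List.slice_from_natCast, PySem.List.slice_to_natCast]
  simp
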